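-- pv_equiv track=rewrite | github.com/StevedeRose/AdventOfCode | day_22.py | get_parents_children
-- ===== SOURCE A (Python) =====
-- from collections import defaultdict
--
-- def generate_blocks(brick):
--     """
--     Génère les blocs (cubes) occupés par une brique.
--     """
--     (start_x, start_y, start_z), (end_x, end_y, end_z) = brick
--     ranges = [(start_x, end_x + 1), (start_y, end_y + 1), (start_z, end_z + 1)]
--     return [(x, y, z) for x in range(*ranges[0]) for y
--             in range(*ranges[1]) for z in range(*ranges[2])]
--
-- def supports(brick1, brick2):
--     """
--     Définit si la brique brick1 supporte la brique brick2.
--     """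
--     return any((x, y, z + 1) in generate_blocks(brick2) for x, y, z in generate_blocks(brick1))
--
-- def get_parents_children(bricks):
--     """
--     Identifie les parents et les enfants des briques dans l'ordre de chute.
--     """
--     parents = defaultdict(list)
--     children = defaultdict(list)
--
--     for i, brick1 in enumerate(bricks):
--         for j, brick2 in enumerate(bricks):
--             if brick2[0][2] > brick1[1][2] + 1:
--                 break
--
--             if j > i and supports(brick1, brick2):
--                 parents[j].append(i)
--                 children[i].append(j)
--
--     return parents, children, len(bricks)
-- ===== SOURCE B (Python) =====
-- from collections import defaultdict
--
-- def supports(brick1, brick2):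
--     """True iff brick1 supports brick2: x- and y-intervals overlap and
--     some cube of brick1 sits directly under a cube of brick2."""
--     (sx1, sy1, sz1), (ex1, ey1, ez1) = brick1
--     (sx2, sy2, sz2), (ex2, ey2, ez2) = brick2
--     return (max(sx1, sx2) <= min(ex1, ex2)
--             and max(sy1, sy2) <= min(ey1, ey2)
--             and max(sz1, sz2 - 1) <= min(ez1, ez2 - 1))
--
-- def get_parents_children(bricks):
--     """
--     Identifie les parents et les enfants des briques dans l'ordre de chute.
--     """
--     # First collect the supporting pairs (i supports j), then build both maps.
--     pairs = []
--     for i, brick1 in enumerate(bricks):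
--         for j, brick2 in enumerate(bricks):
--             if brick2[0][2] > brick1[1][2] + 1:
--                 break
--             if j > i and supports(brick1, brick2):
--                 pairs.append((i, j))
--
--     parents = defaultdict(list)
--     children = defaultdict(list)
--     for i, j in pairs:
--         parents[j].append(i)
--         children[i].append(j)
--
--     return parents, children, len(bricks)
-- ===== Notes on version B (the rewrite author's own statement) =====
-- stated objective: faster
-- what changed: supports is computed by constant-time interval-overlap arithmetic (x/y overlap plus z-adjacency max(sz1,sz2-1)<=min(ez1,ez2-1)) instead of enumerating every occupied cube of both bricks and membership-testing a list, and the support pairs are collected first and the two dicts built in a separate pass.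
import Mathlib
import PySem

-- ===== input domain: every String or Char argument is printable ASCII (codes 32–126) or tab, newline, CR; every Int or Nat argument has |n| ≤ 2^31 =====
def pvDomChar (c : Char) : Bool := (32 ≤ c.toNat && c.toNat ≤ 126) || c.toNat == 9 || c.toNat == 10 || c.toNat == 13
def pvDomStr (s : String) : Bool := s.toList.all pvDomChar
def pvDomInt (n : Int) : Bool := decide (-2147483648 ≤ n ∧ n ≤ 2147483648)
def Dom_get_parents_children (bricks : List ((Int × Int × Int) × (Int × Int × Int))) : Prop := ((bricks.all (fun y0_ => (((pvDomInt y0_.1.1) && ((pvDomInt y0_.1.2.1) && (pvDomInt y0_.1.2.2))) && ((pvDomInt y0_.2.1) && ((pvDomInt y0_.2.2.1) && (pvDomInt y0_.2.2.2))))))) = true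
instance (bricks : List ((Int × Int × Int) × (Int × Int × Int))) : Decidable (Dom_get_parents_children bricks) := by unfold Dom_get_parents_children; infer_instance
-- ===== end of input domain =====

-- B replaces A's cube-enumeration `supports` by constant-time interval arithmetic and builds the
-- two dicts from a pre-collected pair list (objective: faster; A's return value only is compared).

-- ===== PORT A =====
-- generate_blocks(brick): all cubes occupied by a brick
def generate_blocks (brick : (Int × Int × Int) × (Int × Int × Int)) : List (Int × Int × Int) :=
  (PySem.List.pyRange brick.1.1 (brick.2.1 + 1) 1).flatMap (fun x =>
    (PySem.List.pyRange brick.1.2.1 (brick.2.2.1 + 1) 1).flatMap (fun y =>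
      (PySem.List.pyRange brick.1.2.2 (brick.2.2.2 + 1) 1).map (fun z => (x, y, z))))

-- supports(brick1, brick2): any cube of brick1 directly below a cube of brick2
def supportsA (b1 b2 : (Int × Int × Int) × (Int × Int × Int)) : Bool :=
  (generate_blocks b1).any (fun p => decide ((p.1, p.2.1, p.2.2 + 1) ∈ generate_blocks b2))

-- the inner `for j, brick2 in enumerate(bricks)` loop with its break, updating both defaultdicts
def pcInnerA (b1 : (Int × Int × Int) × (Int × Int × Int)) (i : Int) :
    List (Int × ((Int × Int × Int) × (Int × Int × Int))) →
    PySem.Dict Int (List Int) × PySem.Dict Int (List Int) →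
    PySem.Dict Int (List Int) × PySem.Dict Int (List Int)
  | [], st => st
  | (j, b2) :: rest, st =>
    if b2.1.2.2 > b1.2.2.2 + 1 then st
    else
      pcInnerA b1 i rest
        (if j > i ∧ supportsA b1 b2 then
          (st.1.insert j (st.1.getD j [] ++ [i]), st.2.insert i (st.2.getD i [] ++ [j]))
        else st)

def get_parents_children (bricks : List ((Int × Int × Int) × (Int × Int × Int))) : (List (Int × List Int)) × (List (Int × List Int)) × Int :=
  let enum := PySem.List.enumerate bricks 0
  let st := enum.foldl (fun st q => pcInnerA q.2 q.1 enum st) (PySem.Dict.empty, PySem.Dict.empty)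
  (st.1.items, st.2.items, (bricks.length : Int))

-- ===== PORT B =====
-- supports(brick1, brick2) by interval arithmetic: x/y overlap and vertical adjacency
def supportsB (b1 b2 : (Int × Int × Int) × (Int × Int × Int)) : Bool :=
  decide (max b1.1.1 b2.1.1 ≤ min b1.2.1 b2.2.1) &&
  decide (max b1.1.2.1 b2.1.2.1 ≤ min b1.2.2.1 b2.2.2.1) &&
  decide (max b1.1.2.2 (b2.1.2.2 - 1) ≤ min b1.2.2.2 (b2.2.2.2 - 1))

-- inner loop of the pair-collection phase (with its break), producing the appended (i, j) pairs
def pcPairsInner (b1 : (Int × Int × Int) × (Int × Int × Int)) (i : Int) :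
    List (Int × ((Int × Int × Int) × (Int × Int × Int))) → List (Int × Int)
  | [] => []
  | (j, b2) :: rest =>
    if b2.1.2.2 > b1.2.2.2 + 1 then []
    else (if j > i ∧ supportsB b1 b2 then [(i, j)] else []) ++ pcPairsInner b1 i rest

-- the second pass: one pair updates both defaultdicts
def pcApply (st : PySem.Dict Int (List Int) × PySem.Dict Int (List Int)) (p : Int × Int) :
    PySem.Dict Int (List Int) × PySem.Dict Int (List Int) :=
  (st.1.insert p.2 (st.1.getD p.2 [] ++ [p.1]), st.2.insert p.1 (st.2.getD p.1 [] ++ [p.2]))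

def get_parents_children_alt (bricks : List ((Int × Int × Int) × (Int × Int × Int))) : (List (Int × List Int)) × (List (Int × List Int)) × Int :=
  let enum := PySem.List.enumerate bricks 0
  let pairs := enum.foldl (fun acc q => acc ++ pcPairsInner q.2 q.1 enum) []
  let st := pairs.foldl pcApply (PySem.Dict.empty, PySem.Dict.empty)
  (st.1.items, st.2.items, (bricks.length : Int))

-- ===== PRECONDITION & SPEC =====
def Spec_get_parents_children (bricks : List ((Int × Int × Int) × (Int × Int × Int))) (out : (List (Int × List Int)) × (List (Int × List Int)) × Int) : Prop := out = get_parents_children_alt bricks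
instance (bricks : List ((Int × Int × Int) × (Int × Int × Int))) (out : (List (Int × List Int)) × (List (Int × List Int)) × Int) : Decidable (Spec_get_parents_children bricks out) := by unfold Spec_get_parents_children; infer_instance

-- ===== CLAIM (what is proved, stated in full; the proofs are below) =====
def Claim_equal_get_parents_children : Prop := ∀ (bricks : List ((Int × Int × Int) × (Int × Int × Int))), Dom_get_parents_children bricks → Spec_get_parents_children bricks (get_parents_children bricks)

-- ===== LEMMAS AND PROOFS =====

-- membership in A's cube list is interval membership on each axis
theorem mem_generate_blocks (b : (Int × Int × Int) × (Int × Int × Int)) (p : Int × Int × Int) :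
    p ∈ generate_blocks b ↔
      (b.1.1 ≤ p.1 ∧ p.1 ≤ b.2.1) ∧ (b.1.2.1 ≤ p.2.1 ∧ p.2.1 ≤ b.2.2.1) ∧
      (b.1.2.2 ≤ p.2.2 ∧ p.2.2 ≤ b.2.2.2) := by
  obtain ⟨x, y, z⟩ := p
  simp only [generate_blocks, List.mem_flatMap, List.mem_map, PySem.List.mem_pyRange_one,
    Prod.mk.injEq]
  constructor
  · rintro ⟨x', hx, y', hy, z', hz, rfl, rfl, rfl⟩; omega
  · rintro ⟨hx, hy, hz⟩; exact ⟨x, by omega, y, by omega, z, by omega, rfl, rfl, rfl⟩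

-- the two `supports` agree on every pair of bricks
theorem supports_eq (b1 b2 : (Int × Int × Int) × (Int × Int × Int)) :
    supportsA b1 b2 = supportsB b1 b2 := by
  rw [Bool.eq_iff_iff]
  simp only [supportsA, supportsB, List.any_eq_true, decide_eq_true_eq,
    mem_generate_blocks, Bool.and_eq_true]
  constructor
  · rintro ⟨⟨x, y, z⟩, h1, h2⟩
    dsimp only at h1 h2
    exact ⟨⟨by omega, by omega⟩, by omega⟩
  · rintro ⟨⟨hx, hy⟩, hz⟩
    refine ⟨(max b1.1.1 b2.1.1, max b1.1.2.1 b2.1.2.1, max b1.1.2.2 (b2.1.2.2 - 1)), ?_, ?_⟩ <;>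
      dsimp only <;> exact ⟨⟨by omega, by omega⟩, ⟨by omega, by omega⟩, by omega, by omega⟩

-- A's inner loop equals folding pcApply over B's collected pairs
theorem pcInnerA_eq (b1 : (Int × Int × Int) × (Int × Int × Int)) (i : Int)
    (l : List (Int × ((Int × Int × Int) × (Int × Int × Int))))
    (st : PySem.Dict Int (List Int) × PySem.Dict Int (List Int)) :
    pcInnerA b1 i l st = (pcPairsInner b1 i l).foldl pcApply st := by
  induction l generalizing st with
  | nil => rfl
  | cons q rest ih =>
    obtain ⟨j, b2⟩ := q
    simp only [pcInnerA, pcPairsInner, supports_eq]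
    split
    · rfl
    · rw [List.foldl_append, ih]
      congr 1
      split <;> rfl

-- A's outer loop equals folding pcApply over the flattened pair lists
theorem outer_eq (enum l : List (Int × ((Int × Int × Int) × (Int × Int × Int))))
    (st : PySem.Dict Int (List Int) × PySem.Dict Int (List Int)) :
    l.foldl (fun st q => pcInnerA q.2 q.1 enum st) st =
      (l.flatMap (fun q => pcPairsInner q.2 q.1 enum)).foldl pcApply st := by
  induction l generalizing st with
  | nil => rfl
  | cons q rest ih =>
    rw [List.foldl_cons, ih, pcInnerA_eq, List.flatMap_cons, List.foldl_append]

-- ===== VERDICT (by name: the statement is the Claim_ definition above) =====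
theorem get_parents_children_spec : Claim_equal_get_parents_children := by
  intro bricks _
  unfold Spec_get_parents_children get_parents_children get_parents_children_alt
  simp only [outer_eq, PySem.List.foldl_append_eq_flatMap, List.nil_append]
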